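-- pv_equiv track=rewrite | github.com/ZScomnet/Programmers | Greedy/best_set.py | solution
-- ===== SOURCE A (Python) =====
-- def solution(n, s):
-- 	if s // n == 0:
-- 		return [-1]
-- 	answer = [s//n]*n
-- 	cnt = s%n
-- 	while cnt > 0:
-- 		answer[-1-cnt+1] += 1
-- 		cnt -= 1
-- 	return answer
-- ===== SOURCE B (Python) =====
-- def solution(n, s):
--     if s // n == 0:
--         return [-1]
--     out = []
--     m, t = n, s
--     while m > 0:
--         q = t // m
--         out.append(q)
--         t -= q
--         m -= 1
--     return out
-- ===== Notes on version B (the rewrite author's own statement) =====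
-- stated objective: alternative
-- what changed: Instead of precomputing s//n and s%n and patching +1 onto the tail of a uniform array, B never computes the remainder: it repeatedly emits t//m for the remaining sum t and remaining slot count m, subtracting each emitted value, so every element is recomputed by a fresh floor division with a shrinking divisor.
import Mathlib
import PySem

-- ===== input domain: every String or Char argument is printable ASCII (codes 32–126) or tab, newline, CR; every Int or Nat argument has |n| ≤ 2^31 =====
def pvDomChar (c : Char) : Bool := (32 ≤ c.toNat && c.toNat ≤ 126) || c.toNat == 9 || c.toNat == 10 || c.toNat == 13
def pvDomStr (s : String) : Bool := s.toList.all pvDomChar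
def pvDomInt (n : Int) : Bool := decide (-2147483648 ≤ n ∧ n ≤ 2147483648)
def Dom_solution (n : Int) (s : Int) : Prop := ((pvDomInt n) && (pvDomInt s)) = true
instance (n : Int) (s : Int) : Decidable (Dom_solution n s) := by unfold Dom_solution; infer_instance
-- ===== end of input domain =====

-- B drops A's remainder bookkeeping entirely: each element is a fresh floor division
-- of the remaining sum by the remaining slot count (objective: alternative).

-- ===== PORT A =====
-- while cnt > 0: answer[-1-cnt+1] += 1; cnt -= 1
-- answer[-1-cnt+1] is answer[-cnt]; the negative index resolves to len - cnt, which is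
-- always in range when the loop runs (n > 0 and 0 < cnt = s % n < n), so List.modify is exact here.
def solutionLoop (answer : List Int) (cnt : Int) : List Int :=
  if h : cnt > 0 then
    solutionLoop (answer.modify (answer.length - cnt.toNat) (· + 1)) (cnt - 1)
  else answer
termination_by cnt.toNat
decreasing_by omega

def solution (n : Int) (s : Int) : List Int :=
  if PySem.Int.floordiv s n = 0 then [-1]
  else
    let answer := List.replicate n.toNat (PySem.Int.floordiv s n)
    solutionLoop answer (PySem.Int.mod s n)

-- ===== PORT B =====
-- while m > 0: q = t // m; out.append(q); t -= q; m -= 1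
def solutionAltLoop (out : List Int) (m : Int) (t : Int) : List Int :=
  if h : m > 0 then
    solutionAltLoop (out ++ [PySem.Int.floordiv t m]) (m - 1) (t - PySem.Int.floordiv t m)
  else out
termination_by m.toNat
decreasing_by omega

def solution_alt (n : Int) (s : Int) : List Int :=
  if PySem.Int.floordiv s n = 0 then [-1]
  else solutionAltLoop [] n s

-- ===== PRECONDITION & SPEC =====
-- Python raises ZeroDivisionError at s // n when n = 0; both A and B raise there.
def Pre_solution (n : Int) (s : Int) : Prop := n ≠ 0
instance (n : Int) (s : Int) : Decidable (Pre_solution n s) := by unfold Pre_solution; infer_instance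
def pvWitness_solution : Int × Int := (5, 17)

def Spec_solution (n : Int) (s : Int) (out : List Int) : Prop := out = solution_alt n s
instance (n : Int) (s : Int) (out : List Int) : Decidable (Spec_solution n s out) := by unfold Spec_solution; infer_instance

-- ===== CLAIM (what is proved, stated in full; the proofs are below) =====
def Claim_equal_solution : Prop := ∀ (n : Int) (s : Int), Dom_solution n s → Pre_solution n s → Spec_solution n s (solution n s)

-- ===== LEMMAS AND PROOFS =====

lemma modify_append_len {α : Type} (xs ys : List α) (f : α → α) :
    (xs ++ ys).modify xs.length f = xs ++ ys.modify 0 f := by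
  induction xs with
  | nil => simp
  | cons a t ih => simpa [List.modify_succ_cons] using ih

-- A-side loop invariant: with c increments still to do (c ≤ r ≤ m), the list is
-- (m-r) copies of q, then (r-c) already-incremented slots, then c untouched slots.
lemma solutionLoop_inv (q : Int) (m r : Nat) (hr : r ≤ m) :
    ∀ c : Nat, c ≤ r →
    solutionLoop (List.replicate (m - r) q ++ (List.replicate (r - c) (q + 1) ++ List.replicate c q)) (c : Int)
      = List.replicate (m - r) q ++ List.replicate r (q + 1) := by
  intro c
  induction c with
  | zero => intro _; rw [solutionLoop]; simp
  | succ d ih =>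
    intro hc
    rw [solutionLoop, dif_pos (by positivity : ((d + 1 : Nat) : Int) > 0)]
    have hlen : (List.replicate (m - r) q ++ (List.replicate (r - (d + 1)) (q + 1) ++ List.replicate (d + 1) q)).length = m := by
      simp; omega
    have htoNat : ((d + 1 : Nat) : Int).toNat = d + 1 := by omega
    rw [hlen, htoNat]
    have hsplit : m - (d + 1) = (List.replicate (m - r) q ++ List.replicate (r - (d + 1)) (q + 1)).length := by
      simp; omega
    have hmod :
        (List.replicate (m - r) q ++ (List.replicate (r - (d + 1)) (q + 1) ++ List.replicate (d + 1) q)).modify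
          (m - (d + 1)) (· + 1)
        = List.replicate (m - r) q ++ (List.replicate (r - d) (q + 1) ++ List.replicate d q) := by
      rw [← List.append_assoc, hsplit, modify_append_len]
      have h0 : (List.replicate (d + 1) q).modify 0 (· + 1) = (q + 1) :: List.replicate d q := by
        simp [List.replicate_succ, List.modify_zero_cons]
      rw [h0, List.append_assoc]
      congr 1
      have hrd : r - d = (r - (d + 1)) + 1 := by omega
      rw [hrd, List.replicate_add]
      simp
    rw [hmod]
    have hsub : ((d + 1 : Nat) : Int) - 1 = (d : Int) := by omega
    rw [hsub]
    exact ih (by omega)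

lemma solutionLoop_replicate (q : Int) (m r : Nat) (hr : r ≤ m) :
    solutionLoop (List.replicate m q) (r : Int)
      = List.replicate (m - r) q ++ List.replicate r (q + 1) := by
  have h := solutionLoop_inv q m r hr r le_rfl
  simpa [← List.replicate_add, Nat.sub_add_cancel hr] using h

-- B-side loop: repeated floor division by the shrinking slot count produces exactly
-- (m - t%m) copies of t//m followed by (t%m) copies of t//m + 1.
lemma solutionAltLoop_eq : ∀ (k : Nat) (m : Int), m.toNat = k → 0 < m →
    ∀ (acc : List Int) (t : Int),
    solutionAltLoop acc m t
      = acc ++ (List.replicate (m - PySem.Int.mod t m).toNat (PySem.Int.floordiv t m)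
          ++ List.replicate (PySem.Int.mod t m).toNat (PySem.Int.floordiv t m + 1)) := by
  intro k
  induction k with
  | zero => intro m hk hm; omega
  | succ d ih =>
    intro m hk hm acc t
    have hqr := PySem.Int.floordiv_mul_add_mod t m
    have hr0 := PySem.Int.mod_nonneg t hm
    have hrm := PySem.Int.mod_lt t hm
    set q := PySem.Int.floordiv t m with hq
    set r := PySem.Int.mod t m with hr
    rw [solutionAltLoop, dif_pos hm]
    by_cases h1 : m = 1
    · -- last slot: m - 1 = 0, the recursive call returns immediately
      subst h1
      have hr0' : r = 0 := by omega
      rw [solutionAltLoop, dif_neg (by omega : ¬ (1 : Int) - 1 > 0)]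
      simp [hr0']
      omega
    · -- m ≥ 2: the next division carries quotient q (or q+1 when r = m-1)
      have hm1 : 0 < m - 1 := by omega
      have hk1 : (m - 1).toNat = d := by omega
      by_cases hcase : r < m - 1
      · have hq' : PySem.Int.floordiv (t - q) (m - 1) = q := by
          rw [PySem.Int.floordiv_eq_iff_of_pos hm1]
          constructor <;> nlinarith
        have hr' : PySem.Int.mod (t - q) (m - 1) = r := by
          have h := PySem.Int.floordiv_mul_add_mod (t - q) (m - 1)
          rw [hq'] at h; nlinarith
        rw [ih (m - 1) hk1 hm1, hq', hr', ← hq]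
        have hcnt : (m - r).toNat = (m - 1 - r).toNat + 1 := by omega
        rw [hcnt, List.replicate_succ]
        simp
      · have hrr : r = m - 1 := by omega
        have hq' : PySem.Int.floordiv (t - q) (m - 1) = q + 1 := by
          rw [PySem.Int.floordiv_eq_iff_of_pos hm1]
          constructor <;> nlinarith
        have hr' : PySem.Int.mod (t - q) (m - 1) = 0 := by
          have h := PySem.Int.floordiv_mul_add_mod (t - q) (m - 1)
          rw [hq'] at h; nlinarith
        rw [ih (m - 1) hk1 hm1, hq', hr', ← hq]
        have hcnt1 : (m - r).toNat = 1 := by omega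
        have hcnt2 : (m - 1 - 0).toNat = r.toNat := by omega
        rw [hcnt1, hcnt2]
        simp

-- ===== VERDICT (by name: the statement is the Claim_ definition above) =====
theorem solution_spec : Claim_equal_solution := by
  intro n s _ hn
  unfold Spec_solution solution solution_alt
  by_cases hq : PySem.Int.floordiv s n = 0
  · simp [hq]
  · rcases lt_or_gt_of_ne hn with hneg | hpos
    · -- n < 0: A's list is empty and its loop does not run; B's loop does not run either
      have hb := PySem.Int.mod_neg_bounds s hneg
      have hnp : ¬ PySem.Int.mod s n > 0 := by omega
      have h1 : n.toNat = 0 := by omega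
      simp only [if_neg hq]
      rw [solutionLoop, dif_neg hnp, solutionAltLoop, dif_neg (by omega : ¬ n > 0)]
      simp [h1]
    · -- n > 0: both sides equal (n - s%n) copies of s//n followed by s%n copies of s//n + 1
      have h0 := PySem.Int.mod_nonneg s hpos
      have h1 := PySem.Int.mod_lt s hpos
      have hr : (PySem.Int.mod s n).toNat ≤ n.toNat := by omega
      have hcast : ((PySem.Int.mod s n).toNat : Int) = PySem.Int.mod s n := by omega
      have hA := solutionLoop_replicate (PySem.Int.floordiv s n) n.toNat (PySem.Int.mod s n).toNat hr
      rw [hcast] at hA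
      have hB := solutionAltLoop_eq n.toNat n rfl hpos [] s
      simp only [if_neg hq]
      rw [hA, hB]
      have hsub : (n - PySem.Int.mod s n).toNat = n.toNat - (PySem.Int.mod s n).toNat := by omega
      rw [hsub]
      simp
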